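-- pv_equiv track=rewrite | github.com/baojie/shiji-kb | scripts/build_metro_map_data.py | get_chapter_color
-- ===== SOURCE A (Python) =====
-- CHAPTER_GROUPS = {
--     "本纪": {"range": range(1, 13), "colors": [
--         "#c0392b", "#e74c3c", "#d35400", "#e67e22", "#f39c12",
--         "#f1c40f", "#27ae60", "#2ecc71", "#1abc9c", "#16a085",
--         "#2980b9", "#3498db",
--     ]},
--     "表": {"range": range(13, 23), "colors": [
--         "#7f8c8d", "#95a5a6", "#7f8c8d", "#95a5a6", "#7f8c8d",
--         "#95a5a6", "#7f8c8d", "#95a5a6", "#7f8c8d", "#95a5a6",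
--     ]},
--     "书": {"range": range(23, 31), "colors": [
--         "#8e44ad", "#9b59b6", "#8e44ad", "#9b59b6",
--         "#8e44ad", "#9b59b6", "#8e44ad", "#9b59b6",
--     ]},
--     "世家": {"range": range(31, 61), "colors": [
--         "#1a1a2e", "#16213e", "#0f3460", "#533483", "#e94560",
--         "#2c3e50", "#34495e", "#1abc9c", "#16a085", "#27ae60",
--         "#2ecc71", "#3498db", "#2980b9", "#9b59b6", "#8e44ad",
--         "#e74c3c", "#c0392b", "#e67e22", "#d35400", "#f39c12",
--         "#2c3e50", "#34495e", "#1abc9c", "#27ae60", "#2980b9",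
--         "#9b59b6", "#e74c3c", "#e67e22", "#f39c12", "#7f8c8d",
--     ]},
--     "列传": {"range": range(61, 131), "colors": None},  # auto-generate
-- }
--
-- _PALETTE = [
--     "#264653", "#2a9d8f", "#e9c46a", "#f4a261", "#e76f51",
--     "#606c38", "#283618", "#dda15e", "#bc6c25", "#4a4e69",
--     "#22577a", "#38a3a5", "#57cc99", "#80ed99", "#c7f9cc",
--     "#e63946", "#457b9d", "#1d3557", "#a8dadc", "#f1faee",
-- ]
--
-- def get_chapter_color(ch_num):
--     """根据章节号分配颜色"""
--     for group_name, group_info in CHAPTER_GROUPS.items():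
--         if ch_num in group_info["range"]:
--             colors = group_info["colors"]
--             if colors is None:
--                 idx = (ch_num - group_info["range"].start) % len(_PALETTE)
--                 return _PALETTE[idx]
--             idx = ch_num - group_info["range"].start
--             return colors[idx % len(colors)]
--     return "#666"
-- ===== SOURCE B (Python) =====
-- # Arithmetic branch chain: each chapter band resolved directly (parity for the
-- # two alternating bands, direct index / modulo for the others) -- no group scan.
--
-- _BENJI = [
--     "#c0392b", "#e74c3c", "#d35400", "#e67e22", "#f39c12",
--     "#f1c40f", "#27ae60", "#2ecc71", "#1abc9c", "#16a085",
--     "#2980b9", "#3498db",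
-- ]
--
-- _SHIJIA = [
--     "#1a1a2e", "#16213e", "#0f3460", "#533483", "#e94560",
--     "#2c3e50", "#34495e", "#1abc9c", "#16a085", "#27ae60",
--     "#2ecc71", "#3498db", "#2980b9", "#9b59b6", "#8e44ad",
--     "#e74c3c", "#c0392b", "#e67e22", "#d35400", "#f39c12",
--     "#2c3e50", "#34495e", "#1abc9c", "#27ae60", "#2980b9",
--     "#9b59b6", "#e74c3c", "#e67e22", "#f39c12", "#7f8c8d",
-- ]
--
-- _LIEZHUAN = [
--     "#264653", "#2a9d8f", "#e9c46a", "#f4a261", "#e76f51",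
--     "#606c38", "#283618", "#dda15e", "#bc6c25", "#4a4e69",
--     "#22577a", "#38a3a5", "#57cc99", "#80ed99", "#c7f9cc",
--     "#e63946", "#457b9d", "#1d3557", "#a8dadc", "#f1faee",
-- ]
--
--
-- def get_chapter_color(ch_num):
--     """根据章节号分配颜色"""
--     if 1 <= ch_num < 13:
--         return _BENJI[ch_num - 1]
--     if 13 <= ch_num < 23:
--         return "#7f8c8d" if (ch_num - 13) % 2 == 0 else "#95a5a6"
--     if 23 <= ch_num < 31:
--         return "#8e44ad" if (ch_num - 23) % 2 == 0 else "#9b59b6"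
--     if 31 <= ch_num < 61:
--         return _SHIJIA[ch_num - 31]
--     if 61 <= ch_num < 131:
--         return _LIEZHUAN[(ch_num - 61) % 20]
--     return "#666"
-- ===== Notes on version B (the rewrite author's own statement) =====
-- stated objective: alternative
-- what changed: B replaces A's ordered scan over the CHAPTER_GROUPS dict by a direct arithmetic branch chain: each chapter band is resolved by a range test plus a direct index (or parity test for the two alternating two-color bands, and a modulo for the palette band), with no group data structure and no generic modulo-on-length step.
import Mathlib
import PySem

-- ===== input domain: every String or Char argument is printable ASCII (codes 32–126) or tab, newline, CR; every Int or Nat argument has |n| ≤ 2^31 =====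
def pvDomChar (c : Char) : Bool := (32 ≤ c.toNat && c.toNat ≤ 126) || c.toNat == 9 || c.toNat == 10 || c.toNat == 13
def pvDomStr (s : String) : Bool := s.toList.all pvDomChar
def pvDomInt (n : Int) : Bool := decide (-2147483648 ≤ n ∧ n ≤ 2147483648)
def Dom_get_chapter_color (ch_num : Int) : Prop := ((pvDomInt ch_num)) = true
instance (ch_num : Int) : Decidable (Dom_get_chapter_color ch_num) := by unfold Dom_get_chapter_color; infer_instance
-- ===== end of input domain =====

-- B replaces A's scan over the chapter-group dict by a direct arithmetic branch chain
-- (parity tests for the alternating bands, direct indices elsewhere); objective: alternative.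

-- ===== PORT A =====
-- CHAPTER_GROUPS as an ordered list of (name, (range start, range stop, colors-or-None)).
def pvGroups : List (String × (Int × Int × Option (List String))) := [
  ("本纪", (1, 13, some [
  "#c0392b", "#e74c3c", "#d35400", "#e67e22", "#f39c12",
  "#f1c40f", "#27ae60", "#2ecc71", "#1abc9c", "#16a085",
  "#2980b9", "#3498db"])),
  ("表", (13, 23, some [
  "#7f8c8d", "#95a5a6", "#7f8c8d", "#95a5a6", "#7f8c8d",
  "#95a5a6", "#7f8c8d", "#95a5a6", "#7f8c8d", "#95a5a6"])),
  ("书", (23, 31, some [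
  "#8e44ad", "#9b59b6", "#8e44ad", "#9b59b6", "#8e44ad",
  "#9b59b6", "#8e44ad", "#9b59b6"])),
  ("世家", (31, 61, some [
  "#1a1a2e", "#16213e", "#0f3460", "#533483", "#e94560",
  "#2c3e50", "#34495e", "#1abc9c", "#16a085", "#27ae60",
  "#2ecc71", "#3498db", "#2980b9", "#9b59b6", "#8e44ad",
  "#e74c3c", "#c0392b", "#e67e22", "#d35400", "#f39c12",
  "#2c3e50", "#34495e", "#1abc9c", "#27ae60", "#2980b9",
  "#9b59b6", "#e74c3c", "#e67e22", "#f39c12", "#7f8c8d"])),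
  ("列传", (61, 131, none))]

def pvPalette : List String := [
  "#264653", "#2a9d8f", "#e9c46a", "#f4a261", "#e76f51",
  "#606c38", "#283618", "#dda15e", "#bc6c25", "#4a4e69",
  "#22577a", "#38a3a5", "#57cc99", "#80ed99", "#c7f9cc",
  "#e63946", "#457b9d", "#1d3557", "#a8dadc", "#f1faee"]

-- the for-loop of A: try each group in order, `some` = the loop's return, `none` = fall through
def pvGetColorLoop (groups : List (String × (Int × Int × Option (List String)))) (ch_num : Int) : Option String :=
  match groups with
  | [] => none
  | (_, (a, b, colors)) :: rest =>
    if ch_num ∈ PySem.List.pyRange a b 1 then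
      match colors with
      | none =>
        let idx := PySem.Int.mod (ch_num - a) (pvPalette.length : Int)
        some (PySem.List.pyGetD pvPalette idx "")   -- idx is in range, default unreachable
      | some cs =>
        let idx := ch_num - a
        some (PySem.List.pyGetD cs (PySem.Int.mod idx (cs.length : Int)) "")   -- in range, default unreachable
    else pvGetColorLoop rest ch_num

def get_chapter_color (ch_num : Int) : String :=
  match pvGetColorLoop pvGroups ch_num with
  | some c => c
  | none => "#666"

-- ===== PORT B =====
def pvBenji : List String := [
  "#c0392b", "#e74c3c", "#d35400", "#e67e22", "#f39c12",
  "#f1c40f", "#27ae60", "#2ecc71", "#1abc9c", "#16a085",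
  "#2980b9", "#3498db"]

def pvShijia : List String := [
  "#1a1a2e", "#16213e", "#0f3460", "#533483", "#e94560",
  "#2c3e50", "#34495e", "#1abc9c", "#16a085", "#27ae60",
  "#2ecc71", "#3498db", "#2980b9", "#9b59b6", "#8e44ad",
  "#e74c3c", "#c0392b", "#e67e22", "#d35400", "#f39c12",
  "#2c3e50", "#34495e", "#1abc9c", "#27ae60", "#2980b9",
  "#9b59b6", "#e74c3c", "#e67e22", "#f39c12", "#7f8c8d"]

def pvLiezhuan : List String := [
  "#264653", "#2a9d8f", "#e9c46a", "#f4a261", "#e76f51",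
  "#606c38", "#283618", "#dda15e", "#bc6c25", "#4a4e69",
  "#22577a", "#38a3a5", "#57cc99", "#80ed99", "#c7f9cc",
  "#e63946", "#457b9d", "#1d3557", "#a8dadc", "#f1faee"]

-- direct branch chain of Source B: range test + direct index / parity / modulo
def get_chapter_color_alt (ch_num : Int) : String :=
  if 1 ≤ ch_num ∧ ch_num < 13 then
    PySem.List.pyGetD pvBenji (ch_num - 1) ""           -- index 0..11, in range
  else if 13 ≤ ch_num ∧ ch_num < 23 then
    if PySem.Int.mod (ch_num - 13) 2 = 0 then "#7f8c8d" else "#95a5a6"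
  else if 23 ≤ ch_num ∧ ch_num < 31 then
    if PySem.Int.mod (ch_num - 23) 2 = 0 then "#8e44ad" else "#9b59b6"
  else if 31 ≤ ch_num ∧ ch_num < 61 then
    PySem.List.pyGetD pvShijia (ch_num - 31) ""         -- index 0..29, in range
  else if 61 ≤ ch_num ∧ ch_num < 131 then
    PySem.List.pyGetD pvLiezhuan (PySem.Int.mod (ch_num - 61) 20) ""
  else "#666"

-- ===== PRECONDITION & SPEC =====
def Spec_get_chapter_color (ch_num : Int) (out : String) : Prop := out = get_chapter_color_alt ch_num
instance (ch_num : Int) (out : String) : Decidable (Spec_get_chapter_color ch_num out) := by unfold Spec_get_chapter_color; infer_instance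

-- ===== CLAIM (what is proved, stated in full; the proofs are below) =====
def Claim_equal_get_chapter_color : Prop := ∀ (ch_num : Int), Dom_get_chapter_color ch_num → Spec_get_chapter_color ch_num (get_chapter_color ch_num)

-- ===== LEMMAS AND PROOFS =====

set_option maxRecDepth 100000 in
lemma pv_agree_in_range :
    ∀ k ∈ PySem.List.pyRange 1 131 1, get_chapter_color k = get_chapter_color_alt k := by
  decide

lemma pv_out_of_range_A (ch_num : Int) (h : ch_num < 1 ∨ 131 ≤ ch_num) :
    get_chapter_color ch_num = "#666" := by
  unfold get_chapter_color
  have h1 : ¬ (1 ≤ ch_num ∧ ch_num < 13) := by omega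
  have h2 : ¬ (13 ≤ ch_num ∧ ch_num < 23) := by omega
  have h3 : ¬ (23 ≤ ch_num ∧ ch_num < 31) := by omega
  have h4 : ¬ (31 ≤ ch_num ∧ ch_num < 61) := by omega
  have h5 : ¬ (61 ≤ ch_num ∧ ch_num < 131) := by omega
  simp [pvGetColorLoop, pvGroups, PySem.List.mem_pyRange_one, h1, h2, h3, h4, h5]

lemma pv_out_of_range_B (ch_num : Int) (h : ch_num < 1 ∨ 131 ≤ ch_num) :
    get_chapter_color_alt ch_num = "#666" := by
  unfold get_chapter_color_alt
  have h1 : ¬ (1 ≤ ch_num ∧ ch_num < 13) := by omega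
  have h2 : ¬ (13 ≤ ch_num ∧ ch_num < 23) := by omega
  have h3 : ¬ (23 ≤ ch_num ∧ ch_num < 31) := by omega
  have h4 : ¬ (31 ≤ ch_num ∧ ch_num < 61) := by omega
  have h5 : ¬ (61 ≤ ch_num ∧ ch_num < 131) := by omega
  simp [h1, h2, h3, h4, h5]

-- ===== VERDICT (by name: the statement is the Claim_ definition above) =====
theorem get_chapter_color_spec : Claim_equal_get_chapter_color := by
  intro ch_num _
  unfold Spec_get_chapter_color
  by_cases h : 1 ≤ ch_num ∧ ch_num < 131
  · exact pv_agree_in_range ch_num (by rw [PySem.List.mem_pyRange_one]; exact h)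
  · rw [pv_out_of_range_A ch_num (by omega), pv_out_of_range_B ch_num (by omega)]
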